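-- pv_equiv track=rewrite | github.com/appleweiping/Pony-Rec | src/backends/hf_local_backend.py | _truncate_by_stop_strings
-- ===== SOURCE A (Python) =====
-- def _truncate_by_stop_strings(text: str, stop_strings: list[str]) -> str:
--     raw = str(text or "")
--     best = len(raw)
--     for stop in stop_strings:
--         i = raw.find(stop)
--         if i >= 0:
--             best = min(best, i)
--     return raw[:best].strip()
-- ===== SOURCE B (Python) =====
-- def _truncate_by_stop_strings(text: str, stop_strings: list[str]) -> str:
--     # Position-major single scan: walk the text left to right and stop at the
--     # first position where any stop string starts (A is pattern-major: one
--     # full find() per pattern, then a min).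
--     raw = str(text or "")
--     n = len(raw)
--     cut = 0
--     while cut < n and not any(raw.startswith(s, cut) for s in stop_strings):
--         cut += 1
--     return raw[:cut].strip()
-- ===== Notes on version B (the rewrite author's own statement) =====
-- stated objective: faster
-- what changed: A scans pattern-major (one full find() per stop string over the whole text, then takes the min index); B scans position-major: one left-to-right walk that stops at the first position where any stop string starts, so text beyond the earliest match is never examined.
import Mathlib
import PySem

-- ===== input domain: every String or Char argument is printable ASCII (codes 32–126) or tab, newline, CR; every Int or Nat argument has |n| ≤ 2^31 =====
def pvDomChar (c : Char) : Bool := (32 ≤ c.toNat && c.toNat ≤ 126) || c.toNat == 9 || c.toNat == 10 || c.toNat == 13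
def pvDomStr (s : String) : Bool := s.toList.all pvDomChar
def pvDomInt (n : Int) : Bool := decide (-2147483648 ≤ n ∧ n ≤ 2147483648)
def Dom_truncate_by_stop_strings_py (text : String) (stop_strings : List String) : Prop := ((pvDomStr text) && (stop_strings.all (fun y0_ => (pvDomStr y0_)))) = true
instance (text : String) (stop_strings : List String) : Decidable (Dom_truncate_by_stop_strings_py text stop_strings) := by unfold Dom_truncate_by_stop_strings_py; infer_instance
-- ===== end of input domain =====

-- B replaces A's pattern-major scans (one find() per stop string, then min) by a single
-- position-major walk that stops at the first position where any stop string starts.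

-- ===== PORT A =====
def truncate_by_stop_strings_py (text : String) (stop_strings : List String) : String :=
  let raw := text        -- 'str(text or "")': for a str argument this is text itself ("" stays "")
  let best : Int := PySem.Str.len raw
  let best := stop_strings.foldl (fun best stop =>
      let i := PySem.Str.find raw stop
      if 0 ≤ i then min best i else best) best
  PySem.Str.strip (PySem.Str.slice raw none (some best))

-- ===== PORT B =====
-- the while loop of Source B: 'cut' advances along the suffix until some stop string starts there
def pvScanB (stops : List (List Char)) : List Char → Nat → Nat
  | [], cut => cut
  | c :: rest, cut =>
      if stops.any (fun p => PySem.Chars.startswith (c :: rest) p) then cut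
      else pvScanB stops rest (cut + 1)

def truncate_by_stop_strings_py_alt (text : String) (stop_strings : List String) : String :=
  let raw := text        -- 'str(text or "")'
  let cut := pvScanB (stop_strings.map String.toList) raw.toList 0
  PySem.Str.strip (PySem.Str.slice raw none (some (cut : Int)))

-- ===== PRECONDITION & SPEC =====
def Spec_truncate_by_stop_strings_py (text : String) (stop_strings : List String) (out : String) : Prop := out = truncate_by_stop_strings_py_alt text stop_strings
instance (text : String) (stop_strings : List String) (out : String) : Decidable (Spec_truncate_by_stop_strings_py text stop_strings out) := by unfold Spec_truncate_by_stop_strings_py; infer_instance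

-- ===== CLAIM (what is proved, stated in full; the proofs are below) =====
def Claim_equal_truncate_by_stop_strings_py : Prop := ∀ (text : String) (stop_strings : List String), Dom_truncate_by_stop_strings_py text stop_strings → Spec_truncate_by_stop_strings_py text stop_strings (truncate_by_stop_strings_py text stop_strings)

-- ===== LEMMAS AND PROOFS =====

-- characterisation of A's fold: it is ≤ its seed, ≤ every successful find, and is the seed or one of them
lemma foldA_spec (raw : String) (stops : List String) (b : Int) :
    (stops.foldl (fun best stop =>
        if 0 ≤ PySem.Str.find raw stop then min best (PySem.Str.find raw stop) else best) b) ≤ b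
  ∧ (∀ s ∈ stops, 0 ≤ PySem.Str.find raw s →
      (stops.foldl (fun best stop =>
        if 0 ≤ PySem.Str.find raw stop then min best (PySem.Str.find raw stop) else best) b) ≤ PySem.Str.find raw s)
  ∧ ((stops.foldl (fun best stop =>
        if 0 ≤ PySem.Str.find raw stop then min best (PySem.Str.find raw stop) else best) b) = b
     ∨ ∃ s ∈ stops, (stops.foldl (fun best stop =>
        if 0 ≤ PySem.Str.find raw stop then min best (PySem.Str.find raw stop) else best) b) = PySem.Str.find raw s ∧ 0 ≤ PySem.Str.find raw s) := by
  induction stops generalizing b with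
  | nil => simp
  | cons s rest ih =>
    simp only [List.foldl_cons]
    by_cases hf : 0 ≤ PySem.Str.find raw s
    · rw [if_pos hf]
      obtain ⟨h1, h2, h3⟩ := ih (min b (PySem.Str.find raw s))
      refine ⟨le_trans h1 (min_le_left _ _), ?_, ?_⟩
      · intro t ht hft
        rcases List.mem_cons.1 ht with rfl | ht
        · exact le_trans h1 (min_le_right _ _)
        · exact h2 t ht hft
      · rcases h3 with h | ⟨t, ht, he, hf'⟩
        · rcases le_total b (PySem.Str.find raw s) with hc | hc
          · left; rw [h]; exact min_eq_left hc
          · right; exact ⟨s, by simp, by rw [h]; exact min_eq_right hc, hf⟩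
        · right; exact ⟨t, List.mem_cons_of_mem _ ht, he, hf'⟩
    · rw [if_neg hf]
      obtain ⟨h1, h2, h3⟩ := ih b
      refine ⟨h1, ?_, ?_⟩
      · intro t ht hft
        rcases List.mem_cons.1 ht with rfl | ht
        · exact absurd hft hf
        · exact h2 t ht hft
      · rcases h3 with h | ⟨t, ht, he, hf'⟩
        · left; exact h
        · right; exact ⟨t, List.mem_cons_of_mem _ ht, he, hf'⟩

-- characterisation of B's scan: bounds, no match strictly before the result, a match at it if early
lemma scanB_spec (stops : List (List Char)) (s : List Char) (cut : Nat) :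
    cut ≤ pvScanB stops s cut
  ∧ pvScanB stops s cut ≤ cut + s.length
  ∧ (∀ j, j < pvScanB stops s cut - cut → ¬ ∃ p ∈ stops, p <+: s.drop j)
  ∧ (pvScanB stops s cut < cut + s.length →
      ∃ p ∈ stops, p <+: s.drop (pvScanB stops s cut - cut)) := by
  induction s generalizing cut with
  | nil => simp [pvScanB]
  | cons c rest ih =>
    by_cases hm : stops.any (fun p => PySem.Chars.startswith (c :: rest) p)
    · simp only [pvScanB, if_pos hm]
      refine ⟨le_refl _, by simp, ?_, ?_⟩
      · intro j hj
        exact absurd hj (by omega)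
      · intro _
        obtain ⟨p, hp, hpre⟩ := List.any_eq_true.1 hm
        refine ⟨p, hp, ?_⟩
        have : cut - cut = 0 := by omega
        rw [this]
        simpa using (PySem.Chars.startswith_iff _ _).1 hpre
    · obtain ⟨h1, h2, h3, h4⟩ := ih (cut + 1)
      simp only [pvScanB, if_neg hm]
      refine ⟨by omega, by simp only [List.length_cons]; omega, ?_, ?_⟩
      · intro j hj
        match j with
        | 0 =>
          rintro ⟨p, hp, hpre⟩
          exact hm (List.any_eq_true.2 ⟨p, hp, (PySem.Chars.startswith_iff _ _).2 (by simpa using hpre)⟩)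
        | j + 1 =>
          have := h3 j (by omega)
          simpa using this
      · intro hlt
        obtain ⟨p, hp, hpre⟩ := h4 (by simp only [List.length_cons] at hlt; omega)
        refine ⟨p, hp, ?_⟩
        have hc : pvScanB stops rest (cut + 1) - cut = (pvScanB stops rest (cut + 1) - (cut + 1)) + 1 := by omega
        rw [hc]
        simpa using hpre

-- a stop string matching at position j of the text occurs in the text, and find points at or before j
lemma find_le_of_prefix_drop (raw : String) (s : String) (j : Nat)
    (h : s.toList <+: raw.toList.drop j) :
    0 ≤ PySem.Str.find raw s ∧ (PySem.Str.find raw s).toNat ≤ j := by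
  have hin : PySem.Chars.isIn s.toList raw.toList = true :=
    (PySem.Chars.exists_prefix_drop_iff_isIn _ _).1 ⟨j, h⟩
  have hinf : s.toList <:+: raw.toList := (PySem.Chars.isIn_iff_infix _ _).1 hin
  have hpos : 0 ≤ PySem.Chars.find raw.toList s.toList :=
    (PySem.Chars.find_nonneg_iff _ _).2 hinf
  have hsp := PySem.Chars.find_spec (s := raw.toList) (sub := s.toList) hpos
  constructor
  · simpa using hpos
  · simp only [PySem.Str.find_eq]
    by_contra hlt
    exact hsp.2 j (by omega) h

lemma best_eq_cut (text : String) (stops : List String) :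
    (stops.foldl (fun best stop =>
        if 0 ≤ PySem.Str.find text stop then min best (PySem.Str.find text stop) else best)
      (PySem.Str.len text))
    = ((pvScanB (stops.map String.toList) text.toList 0 : Nat) : Int) := by
  obtain ⟨hA1, hA2, hA3⟩ := foldA_spec text stops (PySem.Str.len text)
  obtain ⟨_, hB2, hB3, hB4⟩ := scanB_spec (stops.map String.toList) text.toList 0
  set F := stops.foldl (fun best stop =>
        if 0 ≤ PySem.Str.find text stop then min best (PySem.Str.find text stop) else best)
      (PySem.Str.len text) with hF
  set c := pvScanB (stops.map String.toList) text.toList 0 with hc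
  have hlen : PySem.Str.len text = (text.toList.length : Int) := by
    simp [PySem.Str.len_eq, String.length_toList]
  have hFc : F ≤ (c : Int) := by
    rcases Nat.lt_or_ge c (text.toList.length) with hlt | hge
    · obtain ⟨p, hp, hpre⟩ := hB4 (by omega)
      obtain ⟨s, hs, rfl⟩ := List.mem_map.1 hp
      obtain ⟨hf0, hfle⟩ := find_le_of_prefix_drop text s c (by simpa using hpre)
      have := hA2 s hs hf0
      omega
    · have hce : c = text.toList.length := by omega
      rw [hce]; rw [hlen] at hA1; exact hA1
  have hcF : (c : Int) ≤ F := by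
    rcases hA3 with h | ⟨s, hs, he, hf0⟩
    · rw [h, hlen]; omega
    · have hF0 : 0 ≤ F := he ▸ hf0
      have hfind : 0 ≤ PySem.Chars.find text.toList s.toList := by simpa using hf0
      have hsp := PySem.Chars.find_spec (s := text.toList) (sub := s.toList) hfind
      have hpre : s.toList <+: text.toList.drop F.toNat := by
        rw [show F.toNat = (PySem.Chars.find text.toList s.toList).toNat from by rw [he]; simp]
        exact hsp.1
      rcases Nat.lt_or_ge F.toNat c with hlt | hge
      · exact absurd ⟨s.toList, List.mem_map.2 ⟨s, hs, rfl⟩, hpre⟩ (hB3 F.toNat (by omega))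
      · omega
  omega

-- ===== VERDICT (by name: the statement is the Claim_ definition above) =====
theorem truncate_by_stop_strings_py_spec : Claim_equal_truncate_by_stop_strings_py := by
  intro text stop_strings _
  unfold Spec_truncate_by_stop_strings_py truncate_by_stop_strings_py truncate_by_stop_strings_py_alt
  exact congrArg (fun z => PySem.Str.strip (PySem.Str.slice text none (some z)))
    (best_eq_cut text stop_strings)
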